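-- pv_equiv track=rewrite | github.com/g1tsys/coding | Day 2 - Score 200/530-get_transport_time.py | getTransportTime
-- ===== SOURCE A (Python) =====
-- def getTransportTime(m0, n0, x, m1, n1, times, minTimes):
--     # 若可以一次性运走，结束了
--     if x >= m0 + n0:
--         return times + 1
--
--     # 尝试运一部分狼一部分羊
--     # 要上船的羊数量不可以超过岸上数量、也不可以超过船的容量
--     for i in range(min(m0, x) + 1):
--         # 要上船的狼的数量不可以超过岸上数量、也不可以超过船装了羊后的剩余的容量
--         for j in range(min(n0, x - i) + 1):
--             # 不可以不运
--             if i + j == 0: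
--                 continue
--             # 船离岸后，原来这岸，要么没有羊，要么羊比狼多，才可以运；对岸也要检查，不考虑回程带动物
--             if (m0 - i == 0 or m0 - i > n0 - j) and (m1 + i == 0 or m1 + i > n1 + j):
--                 # 运一次
--                 result = getTransportTime(m0 - i, n0 - j, x, m1 + i, n1 + j, times + 1, minTimes)
--                 # 如果获取了结果，和minTimes比较，但是不结束，继续检查
--                 if result < minTimes and result != 0:
--                     minTimes = result
--
--     return minTimes
-- ===== SOURCE B (Python) =====
-- # B: memoized top-down DP on (bank state, accumulated count): best(m, n, t) is the smallest
-- # reachable final count from this state, treating 0 as the original's "no result" sentinel;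
-- # the minTimes comparison happens once at the top instead of on every backtrack.
--
-- def _safe(m, n):
--     # a bank is fine when no sheep is left on it or sheep outnumber wolves
--     return m == 0 or m > n
--
-- def getTransportTime(m0, n0, x, m1, n1, times, minTimes):
--     if x >= m0 + n0:
--         return times + 1
--     cache = {}
--
--     def best(m, n, p, q, t):
--         # smallest reachable final count (t plus remaining crossings), never 0; None if unreachable
--         if x >= m + n:
--             return t + 1 if t + 1 != 0 else None
--         key = (m, n, t)
--         if key in cache:
--             return cache[key]
--         r = None
--         for i in range(min(m, x) + 1):
--             for j in range(min(n, x - i) + 1):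
--                 if (i or j) and _safe(m - i, n - j) and _safe(p + i, q + j):
--                     s = best(m - i, n - j, p + i, q + j, t + 1)
--                     if s is not None and (r is None or s < r):
--                         r = s
--         cache[key] = r
--         return r
--
--     v = best(m0, n0, m1, n1, times)
--     if v is None:
--         return minTimes
--     return min(minTimes, v)
-- ===== Notes on version B (the rewrite author's own statement) =====
-- stated objective: alternative
-- what changed: Replaces A's exponential branch-and-bound recursion (which threads times/minTimes through every call and compares inside the loops) by a memoized top-down DP computing, once per (bank state, accumulated count), the smallest reachable final count with A's zero-sentinel skip, comparing against minTimes once at the top.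
import Mathlib
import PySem

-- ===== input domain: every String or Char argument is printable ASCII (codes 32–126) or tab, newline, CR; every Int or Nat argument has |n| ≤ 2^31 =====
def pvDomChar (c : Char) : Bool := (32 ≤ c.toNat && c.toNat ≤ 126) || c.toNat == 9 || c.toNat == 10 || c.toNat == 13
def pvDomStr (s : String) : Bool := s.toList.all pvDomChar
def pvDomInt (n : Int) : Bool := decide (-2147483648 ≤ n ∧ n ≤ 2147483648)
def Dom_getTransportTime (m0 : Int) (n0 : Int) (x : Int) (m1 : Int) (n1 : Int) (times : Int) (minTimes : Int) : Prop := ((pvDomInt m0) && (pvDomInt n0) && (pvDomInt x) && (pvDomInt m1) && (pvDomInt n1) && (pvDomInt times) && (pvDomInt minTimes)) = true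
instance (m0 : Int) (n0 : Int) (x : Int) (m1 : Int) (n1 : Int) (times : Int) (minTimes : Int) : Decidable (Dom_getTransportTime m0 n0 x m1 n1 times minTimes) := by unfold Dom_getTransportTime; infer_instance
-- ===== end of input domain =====

-- B replaces A's branch-and-bound recursion by a memoized top-down DP over
-- (bank state, accumulated count), applying the minTimes comparison once at the top.


-- ===== PORT A =====
-- Literal transliteration of A; the recursion is made total with a fuel argument that is
-- never exhausted (each recursive call strictly decreases m0+n0, which stays ≥ 0).
def getTransportTimeFuel : Nat → Int → Int → Int → Int → Int → Int → Int → Int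
  | 0, _, _, _, _, _, _, minTimes => minTimes
  | fuel+1, m0, n0, x, m1, n1, times, minTimes =>
    if m0 + n0 ≤ x then times + 1
    else
      (PySem.List.pyRange 0 (min m0 x + 1) 1).foldl (fun mt i =>
        (PySem.List.pyRange 0 (min n0 (x - i) + 1) 1).foldl (fun mt j =>
          if i + j = 0 then mt
          else if (m0 - i = 0 ∨ m0 - i > n0 - j) ∧ (m1 + i = 0 ∨ m1 + i > n1 + j) then
            let result := getTransportTimeFuel fuel (m0 - i) (n0 - j) x (m1 + i) (n1 + j) (times + 1) mt
            if result < mt ∧ result ≠ 0 then result else mt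
          else mt) mt) minTimes

def getTransportTime (m0 : Int) (n0 : Int) (x : Int) (m1 : Int) (n1 : Int) (times : Int) (minTimes : Int) : Int :=
  getTransportTimeFuel ((m0 + n0).toNat + 1) m0 n0 x m1 n1 times minTimes

-- ===== PORT B =====
-- Literal transliteration of Source B: `best` is a memoized DFS on (bank state, accumulated
-- count); the dict cache is threaded through the computation; same never-exhausted fuel
-- device as in port A.
def pvSafe (m : Int) (n : Int) : Bool := m == 0 || decide (m > n)

def bestFuel : Nat → Int → Int → Int → Int → Int → Int →
    PySem.Dict (Int × Int × Int) (Option Int) → Option Int × PySem.Dict (Int × Int × Int) (Option Int)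
  | 0, _, _, _, _, _, _, cache => (none, cache)
  | fuel+1, m, n, x, p, q, t, cache =>
    if m + n ≤ x then ((if t + 1 ≠ 0 then some (t + 1) else none), cache)
    else
      match cache.get? (m, n, t) with
      | some v => (v, cache)
      | none =>
        let st := (PySem.List.pyRange 0 (min m x + 1) 1).foldl (fun st i =>
          (PySem.List.pyRange 0 (min n (x - i) + 1) 1).foldl (fun st j =>
            if (i ≠ 0 ∨ j ≠ 0) ∧ pvSafe (m - i) (n - j) = true ∧ pvSafe (p + i) (q + j) = true then
              let s := bestFuel fuel (m - i) (n - j) x (p + i) (q + j) (t + 1) st.2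
              match s.1 with
              | none => (st.1, s.2)
              | some sv =>
                (match st.1 with
                 | none => some sv
                 | some r => if sv < r then some sv else some r, s.2)
            else st) st) ((none : Option Int), cache)
        (st.1, st.2.insert (m, n, t) st.1)

def getTransportTime_alt (m0 : Int) (n0 : Int) (x : Int) (m1 : Int) (n1 : Int) (times : Int) (minTimes : Int) : Int :=
  if m0 + n0 ≤ x then times + 1
  else
    match (bestFuel ((m0 + n0).toNat + 1) m0 n0 x m1 n1 times PySem.Dict.empty).1 with
    | none => minTimes
    | some v => min minTimes v

-- ===== PRECONDITION & SPEC =====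
def Spec_getTransportTime (m0 : Int) (n0 : Int) (x : Int) (m1 : Int) (n1 : Int) (times : Int) (minTimes : Int) (out : Int) : Prop := out = getTransportTime_alt m0 n0 x m1 n1 times minTimes
instance (m0 : Int) (n0 : Int) (x : Int) (m1 : Int) (n1 : Int) (times : Int) (minTimes : Int) (out : Int) : Decidable (Spec_getTransportTime m0 n0 x m1 n1 times minTimes out) := by unfold Spec_getTransportTime; infer_instance

-- ===== CLAIM (what is proved, stated in full; the proofs are below) =====
def Claim_equal_getTransportTime : Prop := ∀ (m0 : Int) (n0 : Int) (x : Int) (m1 : Int) (n1 : Int) (times : Int) (minTimes : Int), Dom_getTransportTime m0 n0 x m1 n1 times minTimes → Spec_getTransportTime m0 n0 x m1 n1 times minTimes (getTransportTime m0 n0 x m1 n1 times minTimes)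

-- ===== LEMMAS AND PROOFS =====

-- the list of legal single-crossing moves, as both ports iterate it
def movesList (m0 : Int) (n0 : Int) (x : Int) (m1 : Int) (n1 : Int) : List (Int × Int) :=
  (PySem.List.pyRange 0 (min m0 x + 1) 1).flatMap (fun i =>
    (PySem.List.pyRange 0 (min n0 (x - i) + 1) 1).filterMap (fun j =>
      if i + j ≠ 0 ∧ (m0 - i = 0 ∨ m0 - i > n0 - j) ∧ (m1 + i = 0 ∨ m1 + i > n1 + j)
      then some (i, j) else none))

theorem mem_movesList {m0 n0 x m1 n1 : Int} {p : Int × Int}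
    (hp : p ∈ movesList m0 n0 x m1 n1) :
    0 ≤ p.1 ∧ p.1 ≤ m0 ∧ p.1 ≤ x ∧ 0 ≤ p.2 ∧ p.2 ≤ n0 ∧ p.2 ≤ x - p.1 ∧ p.1 + p.2 ≠ 0 := by
  unfold movesList at hp
  simp only [List.mem_flatMap, List.mem_filterMap] at hp
  obtain ⟨i, hi, j, hj, hij⟩ := hp
  rw [PySem.List.mem_pyRange_one] at hi hj
  split at hij
  · cases hij
    rename_i hcond
    simp only
    omega
  · cases hij

theorem child_toNat_lt {m0 n0 x m1 n1 : Int} {p : Int × Int}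
    (hp : p ∈ movesList m0 n0 x m1 n1) :
    (m0 - p.1 + (n0 - p.2)).toNat < (m0 + n0).toNat := by
  have := mem_movesList hp
  omega

-- ---- the Option-valued minimum and the search specification gm ----

def omin : Option Int → Option Int → Option Int
  | none, b => b
  | some a, none => some a
  | some a, some b => some (min a b)

theorem foldl_omin_attain {os : List (Option Int)} {a : Option Int} {c : Int}
    (h : os.foldl omin a = some c) : a = some c ∨ some c ∈ os := by
  induction os generalizing a with
  | nil => left; exact h
  | cons o os ih =>
    rcases ih (a := omin a o) h with h' | h'
    · cases a with
      | none =>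
        cases o with
        | none => cases h'
        | some u => right; rw [show omin none (some u) = some u from rfl] at h'; simp [h']
      | some b =>
        cases o with
        | none => left; exact h'
        | some u =>
          have hmin : min b u = c := by
            rw [show omin (some b) (some u) = some (min b u) from rfl] at h'
            exact Option.some.inj h'
          rcases min_choice b u with h'' | h''
          · left; have : b = c := by omega
            rw [this]
          · right; have : c = u := by omega
            simp [this]
    · right; exact List.mem_cons_of_mem _ h'

-- gm: the smallest reachable final count (accumulated count plus remaining crossings),
-- with the value 0 skipped exactly as A's `result != 0` guard skips it; none if unreachable
def gm : Nat → Int → Int → Int → Int → Int → Int → Option Int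
  | 0, _, _, _, _, _, _ => none
  | fuel+1, m, n, x, p, q, t =>
    if m + n ≤ x then (if t + 1 = 0 then none else some (t + 1))
    else (movesList m n x p q).foldl
      (fun acc pr => omin acc (gm fuel (m - pr.1) (n - pr.2) x (p + pr.1) (q + pr.2) (t + 1))) none

theorem gm_stable : ∀ (f : Nat) (m n x p q t : Int), (m + n).toNat < f →
    gm f m n x p q t = gm ((m + n).toNat + 1) m n x p q t := by
  intro f
  induction f using Nat.strong_induction_on with
  | _ f IH =>
    intro m n x p q t hf
    match f, hf with
    | f + 1, hf =>
      by_cases hb : m + n ≤ x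
      · simp [gm, hb]
      · simp only [gm, if_neg hb]
        apply PySem.List.foldl_congr_mem
        intro acc pr hpr
        have hc := child_toNat_lt hpr
        rw [IH f (Nat.lt_succ_self f) _ _ _ _ _ _ (by omega),
            IH (m + n).toNat hf _ _ _ _ _ _ (by omega)]

theorem gm_fold (m n x p q t : Int) (hb : ¬ (m + n ≤ x)) :
    gm ((m + n).toNat + 1) m n x p q t =
    (movesList m n x p q).foldl
      (fun acc pr => omin acc
        (gm ((m - pr.1 + (n - pr.2)).toNat + 1) (m - pr.1) (n - pr.2) x (p + pr.1) (q + pr.2) (t + 1)))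
      none := by
  conv_lhs => rw [gm]
  rw [if_neg hb]
  apply PySem.List.foldl_congr_mem
  intro acc pr hpr
  rw [gm_stable ((m + n).toNat) _ _ _ _ _ _ (child_toNat_lt hpr)]

theorem gm_ne_zero : ∀ (f : Nat) (m n x p q t v : Int), gm f m n x p q t = some v → v ≠ 0 := by
  intro f
  induction f using Nat.strong_induction_on with
  | _ f IH =>
    intro m n x p q t v hg
    cases f with
    | zero => simp [gm] at hg
    | succ g =>
      by_cases hb : m + n ≤ x
      · rw [gm, if_pos hb] at hg
        by_cases h0 : t + 1 = 0
        · rw [if_pos h0] at hg; cases hg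
        · rw [if_neg h0] at hg
          have := Option.some.inj hg
          omega
      · rw [gm, if_neg hb, ← List.foldl_map] at hg
        rcases foldl_omin_attain hg with h | h
        · cases h
        · rcases List.mem_map.mp h with ⟨pr, _, hpr⟩
          exact IH g (Nat.lt_succ_self g) _ _ _ _ _ _ _ hpr

-- ---- port A: loop reshaping and exact characterization ----

theorem goA_moves (fuel : Nat) (m0 n0 x m1 n1 t M : Int) (hb : ¬ (m0 + n0 ≤ x)) :
    getTransportTimeFuel (fuel + 1) m0 n0 x m1 n1 t M =
    (movesList m0 n0 x m1 n1).foldl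
      (fun mt p =>
        let r := getTransportTimeFuel fuel (m0 - p.1) (n0 - p.2) x (m1 + p.1) (n1 + p.2) (t + 1) mt
        if r < mt ∧ r ≠ 0 then r else mt) M := by
  rw [show getTransportTimeFuel (fuel + 1) m0 n0 x m1 n1 t M =
      (PySem.List.pyRange 0 (min m0 x + 1) 1).foldl (fun mt i =>
        (PySem.List.pyRange 0 (min n0 (x - i) + 1) 1).foldl (fun mt j =>
          if i + j = 0 then mt
          else if (m0 - i = 0 ∨ m0 - i > n0 - j) ∧ (m1 + i = 0 ∨ m1 + i > n1 + j) then
            let result := getTransportTimeFuel fuel (m0 - i) (n0 - j) x (m1 + i) (n1 + j) (t + 1) mt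
            if result < mt ∧ result ≠ 0 then result else mt
          else mt) mt) M from by rw [getTransportTimeFuel, if_neg hb]]
  unfold movesList
  rw [List.foldl_flatMap]
  apply PySem.List.foldl_congr_mem
  intro acc i _
  rw [List.foldl_filterMap]
  apply PySem.List.foldl_congr_mem
  intro acc2 j _
  by_cases h0 : i + j = 0
  · simp [h0]
  · by_cases hv : (m0 - i = 0 ∨ m0 - i > n0 - j) ∧ (m1 + i = 0 ∨ m1 + i > n1 + j)
    · simp [h0, hv]
    · simp [h0, hv]

theorem A_char : ∀ (fuel : Nat) (m0 n0 x m1 n1 t M : Int), (m0 + n0).toNat < fuel →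
    ¬ (m0 + n0 ≤ x) →
    getTransportTimeFuel fuel m0 n0 x m1 n1 t M =
      (gm ((m0 + n0).toNat + 1) m0 n0 x m1 n1 t).elim M (fun v => min M v) := by
  intro fuel
  induction fuel using Nat.strong_induction_on with
  | _ fuel IH =>
    intro m0 n0 x m1 n1 t M hf hb
    match fuel, hf with
    | fuel + 1, hf =>
      rw [goA_moves fuel m0 n0 x m1 n1 t M hb, gm_fold m0 n0 x m1 n1 t hb]
      have Hfold : ∀ (l : List (Int × Int)), (∀ pr ∈ l, pr ∈ movesList m0 n0 x m1 n1) →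
          ∀ acc : Option Int,
          l.foldl (fun mt p =>
            let r := getTransportTimeFuel fuel (m0 - p.1) (n0 - p.2) x (m1 + p.1) (n1 + p.2) (t + 1) mt
            if r < mt ∧ r ≠ 0 then r else mt) (acc.elim M (fun v => min M v)) =
          (l.foldl (fun a pr => omin a
            (gm ((m0 - pr.1 + (n0 - pr.2)).toNat + 1) (m0 - pr.1) (n0 - pr.2) x (m1 + pr.1) (n1 + pr.2) (t + 1)))
            acc).elim M (fun v => min M v) := by
        intro l
        induction l with
        | nil => intro _ acc; rfl
        | cons pr l ihl =>
          intro hl acc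
          have hpr : pr ∈ movesList m0 n0 x m1 n1 := hl pr (by simp)
          have hfc : (m0 - pr.1 + (n0 - pr.2)).toNat < fuel := by
            have := child_toNat_lt hpr; omega
          rw [List.foldl_cons, List.foldl_cons]
          have hstep : (let r := getTransportTimeFuel fuel (m0 - pr.1) (n0 - pr.2) x (m1 + pr.1) (n1 + pr.2) (t + 1) (acc.elim M (fun v => min M v));
              if r < (acc.elim M (fun v => min M v)) ∧ r ≠ 0 then r else (acc.elim M (fun v => min M v))) =
              ((omin acc (gm ((m0 - pr.1 + (n0 - pr.2)).toNat + 1) (m0 - pr.1) (n0 - pr.2) x (m1 + pr.1) (n1 + pr.2) (t + 1))).elim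
                M (fun v => min M v)) := by
            by_cases hcb : m0 - pr.1 + (n0 - pr.2) ≤ x
            · -- base child: the recursive call returns t + 2 directly
              have hr : getTransportTimeFuel fuel (m0 - pr.1) (n0 - pr.2) x (m1 + pr.1) (n1 + pr.2) (t + 1)
                  (acc.elim M (fun v => min M v)) = t + 1 + 1 := by
                match fuel, hfc with
                | fuel + 1, _ => rw [getTransportTimeFuel, if_pos hcb]
              have hg : gm ((m0 - pr.1 + (n0 - pr.2)).toNat + 1) (m0 - pr.1) (n0 - pr.2) x (m1 + pr.1) (n1 + pr.2) (t + 1) =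
                  (if t + 1 + 1 = 0 then none else some (t + 1 + 1)) := by
                rw [gm, if_pos hcb]
              simp only [hr, hg]
              by_cases h0 : t + 1 + 1 = 0
              · rw [if_pos h0]
                cases acc with
                | none => simp only [omin, Option.elim]; split <;> omega
                | some w => simp only [omin, Option.elim]; split <;> omega
              · rw [if_neg h0]
                cases acc with
                | none => simp only [omin, Option.elim]; split <;> omega
                | some w =>
                  simp only [omin, Option.elim]
                  rcases min_choice w (t + 1 + 1) with hm | hm <;> rw [hm] <;> split <;> omega
            · -- non-base child: its exact value comes from the induction hypothesis
              have hr := IH fuel (Nat.lt_succ_self _) (m0 - pr.1) (n0 - pr.2) x (m1 + pr.1) (n1 + pr.2)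
                (t + 1) (acc.elim M (fun v => min M v)) hfc hcb
              simp only [hr]
              cases hg : gm ((m0 - pr.1 + (n0 - pr.2)).toNat + 1) (m0 - pr.1) (n0 - pr.2) x (m1 + pr.1) (n1 + pr.2) (t + 1) with
              | none =>
                cases acc with
                | none => simp only [omin, Option.elim]; split <;> omega
                | some w => simp only [omin, Option.elim]; split <;> omega
              | some v =>
                have hv0 : v ≠ 0 := gm_ne_zero _ _ _ _ _ _ _ _ hg
                cases acc with
                | none =>
                  simp only [omin, Option.elim]
                  rcases min_choice M v with hm | hm <;> rw [hm] <;> split <;> omega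
                | some w =>
                  simp only [omin, Option.elim]
                  rcases min_choice (min M w) v with hm | hm <;>
                    rcases min_choice M w with hm' | hm' <;>
                      rcases min_choice w v with hm'' | hm'' <;>
                        rcases min_choice M (min w v) with hm''' | hm''' <;>
                          rw [hm, hm'''] <;> split <;> omega
          rw [hstep]
          exact ihl (fun q hq => hl q (List.mem_cons_of_mem _ hq)) _
      exact Hfold (movesList m0 n0 x m1 n1) (fun pr hpr => hpr) none

-- ---- port B: cache invariant and characterization ----

def GoodCache (x Sm Sn : Int) (cache : PySem.Dict (Int × Int × Int) (Option Int)) : Prop :=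
  ∀ m n t v, cache.get? (m, n, t) = some v →
    v = gm ((m + n).toNat + 1) m n x (Sm - m) (Sn - n) t

theorem goB_moves (fuel : Nat) (m n x p q t : Int)
    (cache : PySem.Dict (Int × Int × Int) (Option Int)) (hb : ¬ (m + n ≤ x))
    (hmiss : cache.get? (m, n, t) = none) :
    bestFuel (fuel + 1) m n x p q t cache =
    (let st := (movesList m n x p q).foldl (fun st pr =>
        let s := bestFuel fuel (m - pr.1) (n - pr.2) x (p + pr.1) (q + pr.2) (t + 1) st.2
        match s.1 with
        | none => (st.1, s.2)
        | some sv =>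
          (match st.1 with
           | none => some sv
           | some r => if sv < r then some sv else some r, s.2))
      ((none : Option Int), cache)
     ((st.1 : Option Int), st.2.insert (m, n, t) st.1)) := by
  have hfe : (PySem.List.pyRange 0 (min m x + 1) 1).foldl (fun st i =>
        (PySem.List.pyRange 0 (min n (x - i) + 1) 1).foldl (fun st j =>
          if (i ≠ 0 ∨ j ≠ 0) ∧ pvSafe (m - i) (n - j) = true ∧ pvSafe (p + i) (q + j) = true then
            let s := bestFuel fuel (m - i) (n - j) x (p + i) (q + j) (t + 1) st.2
            match s.1 with
            | none => (st.1, s.2)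
            | some sv =>
              (match st.1 with
               | none => some sv
               | some r => if sv < r then some sv else some r, s.2)
          else st) st) ((none : Option Int), cache) =
      (movesList m n x p q).foldl (fun st pr =>
        let s := bestFuel fuel (m - pr.1) (n - pr.2) x (p + pr.1) (q + pr.2) (t + 1) st.2
        match s.1 with
        | none => (st.1, s.2)
        | some sv =>
          (match st.1 with
           | none => some sv
           | some r => if sv < r then some sv else some r, s.2))
      ((none : Option Int), cache) := by
    unfold movesList
    rw [List.foldl_flatMap]
    apply PySem.List.foldl_congr_mem
    intro acc i hi
    rw [List.foldl_filterMap]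
    apply PySem.List.foldl_congr_mem
    intro acc2 j hj
    rw [PySem.List.mem_pyRange_one] at hi hj
    have hiff : ((i ≠ 0 ∨ j ≠ 0) ∧ pvSafe (m - i) (n - j) = true ∧ pvSafe (p + i) (q + j) = true) ↔
        (i + j ≠ 0 ∧ (m - i = 0 ∨ m - i > n - j) ∧ (p + i = 0 ∨ p + i > q + j)) := by
      simp only [pvSafe, Bool.or_eq_true, beq_iff_eq, decide_eq_true_eq]
      constructor <;> intro h <;> omega
    by_cases hc : i + j ≠ 0 ∧ (m - i = 0 ∨ m - i > n - j) ∧ (p + i = 0 ∨ p + i > q + j)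
    · rw [if_pos (hiff.mpr hc), if_pos hc]
    · rw [if_neg (fun h => hc (hiff.mp h)), if_neg hc]
  rw [bestFuel]
  rw [if_neg hb, hmiss]
  simp only
  rw [hfe]

theorem B_fold (fuel : Nat) (m n x p q t Sm Sn : Int)
    (IH : ∀ pr ∈ movesList m n x p q, ∀ cache, GoodCache x Sm Sn cache →
      (bestFuel fuel (m - pr.1) (n - pr.2) x (p + pr.1) (q + pr.2) (t + 1) cache).1 =
        gm ((m - pr.1 + (n - pr.2)).toNat + 1) (m - pr.1) (n - pr.2) x (p + pr.1) (q + pr.2) (t + 1) ∧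
      GoodCache x Sm Sn (bestFuel fuel (m - pr.1) (n - pr.2) x (p + pr.1) (q + pr.2) (t + 1) cache).2) :
    ∀ (l : List (Int × Int)), (∀ pr ∈ l, pr ∈ movesList m n x p q) →
    ∀ (st : Option Int × PySem.Dict (Int × Int × Int) (Option Int)), GoodCache x Sm Sn st.2 →
      GoodCache x Sm Sn (l.foldl (fun st pr =>
        let s := bestFuel fuel (m - pr.1) (n - pr.2) x (p + pr.1) (q + pr.2) (t + 1) st.2
        match s.1 with
        | none => (st.1, s.2)
        | some sv =>
          (match st.1 with
           | none => some sv
           | some r => if sv < r then some sv else some r, s.2)) st).2 ∧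
      (l.foldl (fun st pr =>
        let s := bestFuel fuel (m - pr.1) (n - pr.2) x (p + pr.1) (q + pr.2) (t + 1) st.2
        match s.1 with
        | none => (st.1, s.2)
        | some sv =>
          (match st.1 with
           | none => some sv
           | some r => if sv < r then some sv else some r, s.2)) st).1 =
      l.foldl (fun acc pr =>
        omin acc (gm ((m - pr.1 + (n - pr.2)).toNat + 1) (m - pr.1) (n - pr.2) x (p + pr.1) (q + pr.2) (t + 1))) st.1 := by
  intro l
  induction l with
  | nil => intro _ st hst; exact ⟨hst, rfl⟩
  | cons pr l ihl =>
    intro hl st hst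
    have hpr : pr ∈ movesList m n x p q := hl pr (by simp)
    obtain ⟨hr1, hr2⟩ := IH pr hpr st.2 hst
    have hstep : (let s := bestFuel fuel (m - pr.1) (n - pr.2) x (p + pr.1) (q + pr.2) (t + 1) st.2
        match s.1 with
        | none => (st.1, s.2)
        | some sv =>
          (match st.1 with
           | none => some sv
           | some r => if sv < r then some sv else some r, s.2)) =
        (omin st.1 (gm ((m - pr.1 + (n - pr.2)).toNat + 1) (m - pr.1) (n - pr.2) x (p + pr.1) (q + pr.2) (t + 1)),
         (bestFuel fuel (m - pr.1) (n - pr.2) x (p + pr.1) (q + pr.2) (t + 1) st.2).2) := by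
      show (match (bestFuel fuel (m - pr.1) (n - pr.2) x (p + pr.1) (q + pr.2) (t + 1) st.2).1 with
        | none => (st.1, (bestFuel fuel (m - pr.1) (n - pr.2) x (p + pr.1) (q + pr.2) (t + 1) st.2).2)
        | some sv =>
          (match st.1 with
           | none => some sv
           | some r => if sv < r then some sv else some r,
           (bestFuel fuel (m - pr.1) (n - pr.2) x (p + pr.1) (q + pr.2) (t + 1) st.2).2)) = _
      rw [hr1]
      cases hcc : gm ((m - pr.1 + (n - pr.2)).toNat + 1) (m - pr.1) (n - pr.2) x (p + pr.1) (q + pr.2) (t + 1) with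
      | none => cases hst1 : st.1 <;> simp [omin]
      | some sv =>
        cases hst1 : st.1 with
        | none => simp [omin]
        | some r =>
          simp only [omin]
          split
          · rename_i hlt
            have : min r sv = sv := by omega
            rw [this]
          · rename_i hlt
            have : min r sv = r := by omega
            rw [this]
    rw [List.foldl_cons, List.foldl_cons, hstep]
    exact ihl (fun w hw => hl w (List.mem_cons_of_mem _ hw))
      (omin st.1 _, (bestFuel fuel (m - pr.1) (n - pr.2) x (p + pr.1) (q + pr.2) (t + 1) st.2).2) hr2

theorem B_char : ∀ (fuel : Nat) (m n x p q t Sm Sn : Int)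
    (cache : PySem.Dict (Int × Int × Int) (Option Int)),
    (m + n).toNat < fuel → m + p = Sm → n + q = Sn → GoodCache x Sm Sn cache →
    (bestFuel fuel m n x p q t cache).1 = gm ((m + n).toNat + 1) m n x p q t ∧
    GoodCache x Sm Sn (bestFuel fuel m n x p q t cache).2 := by
  intro fuel
  induction fuel using Nat.strong_induction_on with
  | _ fuel IHf =>
    intro m n x p q t Sm Sn cache hf hSm hSn hG
    match fuel, hf with
    | fuel + 1, hf =>
      by_cases hb : m + n ≤ x
      · rw [show bestFuel (fuel + 1) m n x p q t cache = ((if t + 1 ≠ 0 then some (t + 1) else none), cache) from by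
          rw [bestFuel, if_pos hb], gm, if_pos hb]
        refine ⟨?_, hG⟩
        by_cases h0 : t + 1 = 0
        · rw [if_pos h0, if_neg (by omega)]
        · rw [if_neg h0, if_pos (by omega)]
      · cases hget : cache.get? (m, n, t) with
        | some v =>
          rw [show bestFuel (fuel + 1) m n x p q t cache = (v, cache) from by
            rw [bestFuel, if_neg hb, hget]]
          have := hG m n t v hget
          have hm1 : Sm - m = p := by omega
          have hn1 : Sn - n = q := by omega
          rw [hm1, hn1] at this
          exact ⟨this, hG⟩
        | none =>
          have hIH : ∀ pr ∈ movesList m n x p q, ∀ cache', GoodCache x Sm Sn cache' →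
              (bestFuel fuel (m - pr.1) (n - pr.2) x (p + pr.1) (q + pr.2) (t + 1) cache').1 =
                gm ((m - pr.1 + (n - pr.2)).toNat + 1) (m - pr.1) (n - pr.2) x (p + pr.1) (q + pr.2) (t + 1) ∧
              GoodCache x Sm Sn (bestFuel fuel (m - pr.1) (n - pr.2) x (p + pr.1) (q + pr.2) (t + 1) cache').2 := by
            intro pr hpr cache' hG'
            have hcf : (m - pr.1 + (n - pr.2)).toNat < fuel := by
              have := child_toNat_lt hpr; omega
            exact IHf fuel (Nat.lt_succ_self _) (m - pr.1) (n - pr.2) x (p + pr.1) (q + pr.2) (t + 1) Sm Sn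
              cache' hcf (by omega) (by omega) hG'
          rw [goB_moves fuel m n x p q t cache hb hget]
          obtain ⟨hG2, hval⟩ := B_fold fuel m n x p q t Sm Sn hIH
            (movesList m n x p q) (fun pr hpr => hpr) (none, cache) hG
          simp only
          have hcmv : (List.foldl (fun st pr =>
              let s := bestFuel fuel (m - pr.1) (n - pr.2) x (p + pr.1) (q + pr.2) (t + 1) st.2
              match s.1 with
              | none => (st.1, s.2)
              | some sv =>
                (match st.1 with
                 | none => some sv
                 | some r => if sv < r then some sv else some r, s.2))
              ((none : Option Int), cache) (movesList m n x p q)).1 =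
              gm ((m + n).toNat + 1) m n x p q t := by
            rw [hval, gm_fold m n x p q t hb]
          refine ⟨hcmv, ?_⟩
          intro a b c v hgetv
          rw [PySem.Dict.get?_insert] at hgetv
          split at hgetv
          · rename_i heq
            have ha : a = m := by rw [Prod.ext_iff] at heq; exact heq.1
            have hbc : b = n ∧ c = t := by
              rw [Prod.ext_iff] at heq
              have := heq.2
              rw [Prod.ext_iff] at this
              exact ⟨this.1, this.2⟩
            have hv : v = gm ((m + n).toNat + 1) m n x p q t := by
              rw [← hcmv]; exact (Option.some.inj hgetv).symm
            rw [hv, ha, hbc.1, hbc.2]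
            have hm1 : Sm - m = p := by omega
            have hn1 : Sn - n = q := by omega
            rw [hm1, hn1]
          · exact hG2 a b c v hgetv

-- ---- assembly ----

theorem goodCache_empty (x Sm Sn : Int) : GoodCache x Sm Sn PySem.Dict.empty := by
  intro a b c v h
  rw [PySem.Dict.get?_empty] at h
  cases h

theorem alt_eval (m0 n0 x m1 n1 t M : Int) (hb : ¬ (m0 + n0 ≤ x)) :
    getTransportTime_alt m0 n0 x m1 n1 t M =
    (match gm ((m0 + n0).toNat + 1) m0 n0 x m1 n1 t with
     | none => M
     | some v => min M v) := by
  have hB := (B_char ((m0 + n0).toNat + 1) m0 n0 x m1 n1 t (m0 + m1) (n0 + n1) PySem.Dict.empty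
    (Nat.lt_succ_self _) rfl rfl (goodCache_empty x (m0 + m1) (n0 + n1))).1
  rw [getTransportTime_alt, if_neg hb, hB]

-- ===== VERDICT (by name: the statement is the Claim_ definition above) =====
theorem getTransportTime_spec : Claim_equal_getTransportTime := by
  intro m0 n0 x m1 n1 t M _dom
  show getTransportTime m0 n0 x m1 n1 t M = getTransportTime_alt m0 n0 x m1 n1 t M
  by_cases hb : m0 + n0 ≤ x
  · rw [show getTransportTime m0 n0 x m1 n1 t M = t + 1 from by
      rw [getTransportTime, getTransportTimeFuel, if_pos hb]]
    rw [show getTransportTime_alt m0 n0 x m1 n1 t M = t + 1 from by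
      rw [getTransportTime_alt, if_pos hb]]
  · rw [alt_eval m0 n0 x m1 n1 t M hb]
    rw [show getTransportTime m0 n0 x m1 n1 t M =
        (gm ((m0 + n0).toNat + 1) m0 n0 x m1 n1 t).elim M (fun v => min M v) from
      A_char ((m0 + n0).toNat + 1) m0 n0 x m1 n1 t M (Nat.lt_succ_self _) hb]
    cases gm ((m0 + n0).toNat + 1) m0 n0 x m1 n1 t <;> rfl
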